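-- pv_equiv track=rewrite | github.com/TNI-Cybersec/NCSA_Senior_Write_Up | WriteUp/Programming/challenge12.py | super_decode
-- ===== SOURCE A (Python) =====
-- def super_decode(secret,n=0):
--     i = 0
--     old = 0
--     out = []
--     if n ==0:
--         for x in secret:
--             old = (x-old)%256
--             out.append(old)
--         return out
--     else:
--         while True:
--             for x in range(256):
--                 if (x + old) % 256 == secret[i]:
--                     out.append(x)
--                     old = x
--                     i+=1
--                     break
--             if i >= len(secret):
--                 return out
-- ===== SOURCE B (Python) =====
-- def super_decode(secret, n=0):
--     # One pass, no branch on n and no 256-wide inner search: the decoded byte at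
--     # each step is the alternating prefix sum s_k - s_{k-1} + s_{k-2} - ... taken
--     # mod 256, so keep the unreduced alternating sum and reduce only at append.
--     out = []
--     alt = 0
--     for x in secret:
--         alt = x - alt
--         out.append(alt % 256)
--     return out
-- ===== Notes on version B (the rewrite author's own statement) =====
-- stated objective: alternative
-- what changed: B drops A's n-branch and its 256-wide inner linear search entirely and computes each output directly as the alternating prefix sum of the input taken mod 256 in a single pass.
import Mathlib
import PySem

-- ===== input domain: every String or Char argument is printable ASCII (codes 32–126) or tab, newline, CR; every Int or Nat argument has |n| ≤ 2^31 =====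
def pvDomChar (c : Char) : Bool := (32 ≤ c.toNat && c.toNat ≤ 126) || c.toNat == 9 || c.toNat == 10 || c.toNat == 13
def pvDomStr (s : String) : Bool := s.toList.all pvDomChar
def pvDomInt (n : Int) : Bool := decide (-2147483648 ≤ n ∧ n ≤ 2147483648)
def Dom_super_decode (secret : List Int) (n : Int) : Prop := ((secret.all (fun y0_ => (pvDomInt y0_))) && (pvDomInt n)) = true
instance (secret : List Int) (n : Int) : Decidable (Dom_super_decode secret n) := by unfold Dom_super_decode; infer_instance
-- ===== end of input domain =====

-- B drops A's n-branch and its 256-wide inner search: one pass producing the alternating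
-- prefix sum mod 256 (objective: alternative single-pass formulation).

-- ===== PORT A =====
-- inner 'for x in range(256): if (x + old) % 256 == secret[i]: … break'
def pvFindX (old s : Int) : Option Int :=
  (PySem.List.pyRange 0 256 1).find? (fun x => PySem.Int.mod (x + old) 256 == s)

-- the 'while True' loop; fuel = remaining indices (each matched x advances i by 1).
-- Where Python raises (secret[i] out of range) or loops forever (no x matches) the
-- port stops with the current out — both cases are outside Pre_super_decode.
def pvWhile (secret : List Int) : Nat → Int → Nat → List Int → List Int
  | 0, _, _, out => out
  | fuel+1, old, i, out =>
    match PySem.List.pyGet? secret (i : Int) with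
    | none => out
    | some s =>
      match pvFindX old s with
      | none => out
      | some x =>
        if secret.length ≤ i + 1 then out ++ [x]
        else pvWhile secret fuel x (i+1) (out ++ [x])

def super_decode (secret : List Int) (n : Int) : List Int :=
  if n = 0 then
    (secret.foldl (fun (st : Int × List Int) x =>
        let old := PySem.Int.mod (x - st.1) 256
        (old, st.2 ++ [old])) ((0 : Int), ([] : List Int))).2
  else
    pvWhile secret secret.length 0 0 []

-- ===== PORT B =====
def super_decode_alt (secret : List Int) (n : Int) : List Int :=
  (secret.foldl (fun (st : Int × List Int) x =>
      let alt := x - st.1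
      (alt, st.2 ++ [PySem.Int.mod alt 256])) ((0 : Int), ([] : List Int))).2

-- ===== PRECONDITION & SPEC =====
-- Pre_ excludes exactly the inputs where A does not return: with n ≠ 0, A raises
-- IndexError on empty secret and loops forever if some element is outside 0..255.
def Pre_super_decode (secret : List Int) (n : Int) : Prop :=
  n = 0 ∨ (secret ≠ [] ∧ ∀ x ∈ secret, 0 ≤ x ∧ x < 256)
instance (secret : List Int) (n : Int) : Decidable (Pre_super_decode secret n) := by
  unfold Pre_super_decode; infer_instance

def pvWitness_super_decode : List Int × Int := ([3, 100, 255], 1)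

def Spec_super_decode (secret : List Int) (n : Int) (out : List Int) : Prop :=
  out = super_decode_alt secret n
instance (secret : List Int) (n : Int) (out : List Int) : Decidable (Spec_super_decode secret n out) := by
  unfold Spec_super_decode; infer_instance

-- ===== CLAIM (what is proved, stated in full; the proofs are below) =====
def Claim_equal_super_decode : Prop := ∀ (secret : List Int) (n : Int), Dom_super_decode secret n → Pre_super_decode secret n → Spec_super_decode secret n (super_decode secret n)

-- ===== LEMMAS AND PROOFS =====

-- reference decoder: out[k] = (s_k - out[k-1]) % 256 with the previous OUTPUT byte as state
def pvDec : List Int → Int → List Int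
  | [], _ => []
  | x :: xs, old =>
    let v := PySem.Int.mod (x - old) 256
    v :: pvDec xs v

lemma pv_mod_sub_mod (x a : Int) :
    PySem.Int.mod (x - PySem.Int.mod a 256) 256 = PySem.Int.mod (x - a) 256 := by
  rw [PySem.Int.mod_eq_emod_of_pos (by norm_num),
      PySem.Int.mod_eq_emod_of_pos (by norm_num),
      PySem.Int.mod_eq_emod_of_pos (by norm_num)]
  omega

lemma foldA_eq (l : List Int) : ∀ (old : Int) (out : List Int),
    (l.foldl (fun (st : Int × List Int) x =>
        let o := PySem.Int.mod (x - st.1) 256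
        (o, st.2 ++ [o])) (old, out)).2 = out ++ pvDec l old := by
  induction l with
  | nil => intro old out; simp [pvDec]
  | cons x xs ih =>
    intro old out
    simp only [List.foldl_cons, pvDec]
    rw [ih]
    simp

lemma foldB_eq (l : List Int) : ∀ (alt : Int) (out : List Int),
    (l.foldl (fun (st : Int × List Int) x =>
        let a := x - st.1
        (a, st.2 ++ [PySem.Int.mod a 256])) (alt, out)).2
      = out ++ pvDec l (PySem.Int.mod alt 256) := by
  induction l with
  | nil => intro alt out; simp [pvDec]
  | cons x xs ih =>
    intro alt out
    simp only [List.foldl_cons, pvDec]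
    rw [ih, pv_mod_sub_mod]
    simp

lemma findX_eq (old s : Int) (h1 : 0 ≤ old) (h2 : old < 256)
    (h3 : 0 ≤ s) (h4 : s < 256) :
    pvFindX old s = some (PySem.Int.mod (s - old) 256) := by
  have hm : PySem.Int.mod (s - old) 256 = (s - old).emod 256 :=
    PySem.Int.mod_eq_emod_of_pos (by norm_num)
  set x0 : Int := (s - old).emod 256 with hx0
  have hx0b : 0 ≤ x0 ∧ x0 < 256 :=
    ⟨Int.emod_nonneg _ (by norm_num), Int.emod_lt_of_pos _ (by norm_num)⟩
  obtain ⟨hx0a, hx0c⟩ := hx0b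
  obtain ⟨k, hk⟩ : ∃ k : Int, s - old = x0 + 256 * k :=
    ⟨(s - old) / 256, by rw [hx0]; exact (Int.emod_add_ediv (s - old) 256).symm⟩
  unfold pvFindX
  rw [PySem.List.pyRange_one_append 0 x0 256 (by omega) (by omega),
      List.find?_append]
  have hnone : (PySem.List.pyRange 0 x0 1).find?
      (fun x => PySem.Int.mod (x + old) 256 == s) = none := by
    rw [List.find?_eq_none]
    intro x hx
    rw [PySem.List.mem_pyRange_one] at hx
    simp only [beq_iff_eq]
    rw [PySem.Int.mod_eq_emod_of_pos (by norm_num)]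
    omega
  rw [hnone, PySem.List.pyRange_one_cons (by omega)]
  simp only [Option.none_or, List.find?_cons]
  have hpred : (PySem.Int.mod (x0 + old) 256 == s) = true := by
    rw [beq_iff_eq, PySem.Int.mod_eq_emod_of_pos (by norm_num)]
    omega
  rw [hpred, hm]

lemma while_eq (secret : List Int) (hall : ∀ x ∈ secret, 0 ≤ x ∧ x < 256) :
    ∀ (fuel : Nat) (i : Nat) (old : Int) (out : List Int),
      0 ≤ old → old < 256 → i + fuel = secret.length → i < secret.length →
      pvWhile secret fuel old i out = out ++ pvDec (secret.drop i) old := by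
  intro fuel
  induction fuel with
  | zero => intro i old out _ _ hf hi; omega
  | succ f ih =>
    intro i old out h1 h2 hf hi
    have hget : PySem.List.pyGet? secret (i : Int) = some secret[i] :=
      PySem.List.pyGet?_ofNat secret i hi
    have hmem : secret[i] ∈ secret := List.getElem_mem hi
    obtain ⟨hs1, hs2⟩ := hall _ hmem
    have hfind := findX_eq old secret[i] h1 h2 hs1 hs2
    have hdrop : secret.drop i = secret[i] :: secret.drop (i + 1) :=
      List.drop_eq_getElem_cons hi
    simp only [pvWhile, hget, hfind, hdrop, pvDec]
    by_cases hlast : secret.length ≤ i + 1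
    · have : secret.drop (i + 1) = [] := List.drop_eq_nil_of_le hlast
      simp [hlast, this, pvDec]
    · simp only [if_neg hlast]
      rw [ih (i + 1) _ (out ++ [PySem.Int.mod (secret[i] - old) 256])
          (PySem.Int.mod_nonneg _ (by norm_num))
          (PySem.Int.mod_lt _ (by norm_num)) (by omega) (by omega)]
      simp

-- ===== VERDICT (by name: the statement is the Claim_ definition above) =====
theorem super_decode_spec : Claim_equal_super_decode := by
  intro secret n _ hpre
  unfold Spec_super_decode super_decode super_decode_alt
  have hB : (secret.foldl (fun (st : Int × List Int) x =>
      let a := x - st.1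
      (a, st.2 ++ [PySem.Int.mod a 256])) ((0 : Int), ([] : List Int))).2
      = pvDec secret 0 := by
    rw [foldB_eq]
    norm_num [PySem.Int.mod]
  by_cases hn : n = 0
  · rw [if_pos hn, hB, foldA_eq]; simp
  · rw [if_neg hn, hB]
    rcases hpre with hn0 | ⟨hne, hall⟩
    · exact absurd hn0 hn
    · have hlen : 0 < secret.length := List.length_pos_iff.mpr hne
      rw [while_eq secret hall secret.length 0 0 [] le_rfl (by norm_num)
          (by omega) hlen]
      simp
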